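-- pv_equiv track=rewrite | github.com/jwoojun/CodingTest | src/main/python/Category/Greedy/모험가 길드.py | solution
-- ===== SOURCE A (Python) =====
-- def solution (n, group) :
--     group.sort()
--     answer = count = 0
--     for i in group:
--         count += 1
--         if count >= i:
--             answer += 1
--             count = 0
--
--     return answer
-- ===== SOURCE B (Python) =====
-- def solution(n, group):
--     group.sort()
--     answer = 0
--     count = 0
--     i = 0
--     m = len(group)
--     while i < m:
--         v = group[i]
--         j = i
--         while j < m and group[j] == v:
--             j += 1
--         count += j - i
--         if v >= 1:
--             answer += count // v
--             count %= v
--         else: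
--             answer += count
--             count = 0
--         i = j
--     return answer
-- ===== Notes on version B (the rewrite author's own statement) =====
-- stated objective: alternative
-- what changed: B replaces A's per-person greedy loop by a pass over maximal runs of equal fear values: each run closes all its groups at once with one floor division (answer += count // v; count %= v) instead of incrementing and resetting per person.
import Mathlib
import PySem

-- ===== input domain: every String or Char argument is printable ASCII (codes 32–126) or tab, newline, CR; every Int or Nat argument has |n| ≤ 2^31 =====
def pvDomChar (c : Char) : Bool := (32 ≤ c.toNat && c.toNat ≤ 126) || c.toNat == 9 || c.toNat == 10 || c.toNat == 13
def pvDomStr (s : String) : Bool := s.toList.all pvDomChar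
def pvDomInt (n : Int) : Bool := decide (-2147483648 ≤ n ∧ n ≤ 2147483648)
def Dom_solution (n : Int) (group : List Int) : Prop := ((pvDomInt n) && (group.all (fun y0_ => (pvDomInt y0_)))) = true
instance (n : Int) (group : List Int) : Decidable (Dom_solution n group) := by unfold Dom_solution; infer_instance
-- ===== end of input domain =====

-- B replaces A's per-person greedy loop by a pass over runs of equal fear values, closing all
-- groups of a run at once with floor division (alternative decomposition; both sort the argument
-- in place in Python, so the side effect is identical; equivalence proved on the return value).

-- ===== PORT A =====
def solutionLoop : List Int → Int → Int → Int
  | [], answer, _ => answer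
  | i :: rest, answer, count =>
    if count + 1 ≥ i then solutionLoop rest (answer + 1) 0
    else solutionLoop rest answer (count + 1)

def solution (n : Int) (group : List Int) : Int :=
  solutionLoop (PySem.List.sorted group (fun x => x) false) 0 0

-- ===== PORT B =====
-- B's inner while-loop that advances j over the run of value v is ported as takeWhile/dropWhile
-- on the remaining list (exact: the run is the maximal prefix equal to v).
def solutionAltLoop : List Int → Int → Int → Int
  | [], answer, _ => answer
  | v :: rest, answer, count =>
    let run := rest.takeWhile (fun x => x == v)
    let tail := rest.dropWhile (fun x => x == v)
    let count' := count + (1 + run.length)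
    if 1 ≤ v then
      solutionAltLoop tail (answer + PySem.Int.floordiv count' v) (PySem.Int.mod count' v)
    else
      solutionAltLoop tail (answer + count') 0
termination_by l _ _ => l.length
decreasing_by
  all_goals exact Nat.lt_succ_of_le (List.length_dropWhile_le _ _)

def solution_alt (n : Int) (group : List Int) : Int :=
  solutionAltLoop (PySem.List.sorted group (fun x => x) false) 0 0

-- ===== PRECONDITION & SPEC =====
def Spec_solution (n : Int) (group : List Int) (out : Int) : Prop := out = solution_alt n group
instance (n : Int) (group : List Int) (out : Int) : Decidable (Spec_solution n group out) := by unfold Spec_solution; infer_instance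

-- ===== CLAIM (what is proved, stated in full; the proofs are below) =====
def Claim_equal_solution : Prop := ∀ (n : Int) (group : List Int), Dom_solution n group → Spec_solution n group (solution n group)

-- ===== LEMMAS AND PROOFS =====

-- A's loop over a run of k copies of v ≥ 1, starting with 0 ≤ count < v, closes ⌊(count+k)/v⌋
-- groups and leaves (count+k) mod v.
lemma loopA_run_pos (v : Int) (hv : 1 ≤ v) :
    ∀ (k : Nat) (t : List Int) (a c : Int), 0 ≤ c → c < v →
      solutionLoop (List.replicate k v ++ t) a c
        = solutionLoop t (a + PySem.Int.floordiv (c + k) v) (PySem.Int.mod (c + k) v) := by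
  intro k
  induction k with
  | zero =>
    intro t a c h0 hc
    rw [PySem.Int.floordiv_eq_ediv_of_pos (by omega), PySem.Int.mod_eq_emod_of_pos (by omega)]
    simp only [List.replicate, List.nil_append, Nat.cast_zero, add_zero]
    rw [Int.ediv_eq_zero_of_lt h0 hc, Int.emod_eq_of_lt h0 hc]
    simp
  | succ k ih =>
    intro t a c h0 hc
    simp only [List.replicate_succ, List.cons_append, solutionLoop]
    by_cases hclose : c + 1 ≥ v
    · have hcv : c + 1 = v := le_antisymm (by omega) hclose
      rw [if_pos hclose, ih t (a + 1) 0 le_rfl (by omega)]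
      have e1 : c + ((k : Int) + 1) = (k : Int) + v * 1 := by omega
      rw [PySem.Int.floordiv_eq_ediv_of_pos (by omega),
          PySem.Int.floordiv_eq_ediv_of_pos (by omega),
          PySem.Int.mod_eq_emod_of_pos (by omega),
          PySem.Int.mod_eq_emod_of_pos (by omega)]
      push_cast
      rw [e1, Int.add_mul_ediv_left _ _ (by omega : v ≠ 0), Int.add_mul_emod_self_left]
      simp only [zero_add]
      ring_nf
    · rw [if_neg hclose, ih t a (c + 1) (by omega) (by omega)]
      have : c + 1 + (k : Int) = c + ((k : Int) + 1) := by ring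
      push_cast
      rw [this]
  
-- A's loop over a run of k copies of v ≤ 0, starting with count = 0, closes a group at every
-- element and leaves count = 0.
lemma loopA_run_nonpos (v : Int) (hv : ¬ 1 ≤ v) :
    ∀ (k : Nat) (t : List Int) (a : Int),
      solutionLoop (List.replicate k v ++ t) a 0 = solutionLoop t (a + k) 0 := by
  intro k
  induction k with
  | zero => intro t a; simp [List.replicate]
  | succ k ih =>
    intro t a
    simp only [List.replicate_succ, List.cons_append, solutionLoop]
    rw [if_pos (by omega), ih t (a + 1)]
    push_cast
    ring_nf

lemma loops_agree : ∀ (N : Nat) (l : List Int), l.length ≤ N → l.Pairwise (· ≤ ·) →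
    ∀ (a c : Int), 0 ≤ c → (∀ v t', l = v :: t' → c < max v 1) →
    solutionLoop l a c = solutionAltLoop l a c := by
  intro N
  induction N with
  | zero =>
    intro l hl _ a c _ _
    have : l = [] := List.eq_nil_of_length_eq_zero (Nat.le_zero.1 hl)
    subst this; simp [solutionLoop, solutionAltLoop]
  | succ N ih =>
    intro l hl hp a c h0 hinv
    match l with
    | [] => simp [solutionLoop, solutionAltLoop]
    | v :: rest =>
      have hsplit : rest.takeWhile (fun x => x == v) ++ rest.dropWhile (fun x => x == v) = rest :=
        List.takeWhile_append_dropWhile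
      have hrunrep : rest.takeWhile (fun x => x == v)
          = List.replicate (rest.takeWhile (fun x => x == v)).length v := by
        rw [List.eq_replicate_iff]
        exact ⟨rfl, fun b hb => by
          have := List.mem_takeWhile_imp hb
          exact beq_iff_eq.1 this⟩
      have hvrest : ∀ x ∈ rest, v ≤ x := (List.pairwise_cons.1 hp).1
      have hptail : (rest.dropWhile (fun x => x == v)).Pairwise (· ≤ ·) :=
        ((List.pairwise_cons.1 hp).2).sublist (List.dropWhile_sublist _)
      have hform : v :: rest
          = List.replicate ((rest.takeWhile (fun x => x == v)).length + 1) v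
              ++ rest.dropWhile (fun x => x == v) := by
        rw [List.replicate_succ, List.cons_append]
        conv_lhs => rw [← hsplit]
        rw [hrunrep]
        simp
      have hcv : c < max v 1 := hinv v rest rfl
      have hlen : (rest.dropWhile (fun x => x == v)).length ≤ N := by
        have h1 : (rest.dropWhile (fun x => x == v)).length ≤ rest.length :=
          List.length_dropWhile_le _ _
        have h2 : rest.length + 1 ≤ N + 1 := hl
        omega
      have htailinv : ∀ w t', rest.dropWhile (fun x => x == v) = w :: t' → v < w := by
        intro w t' ht
        have hw_in : w ∈ rest := by
          rw [← hsplit, ht]; simp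
        have hle : v ≤ w := hvrest w hw_in
        have hne : ¬ ((w == v) = true) := by
          have hhd : (rest.dropWhile (fun x => x == v)) ≠ [] := by rw [ht]; simp
          have := List.head_dropWhile_not (fun x => x == v) hhd
          simpa [ht] using this
        have : w ≠ v := by simpa using hne
        omega
      conv_lhs => rw [hform]
      rw [solutionAltLoop]
      by_cases hv : 1 ≤ v
      · have hcvv : c < v := by
          have : max v 1 = v := max_eq_left hv
          omega
        rw [loopA_run_pos v hv _ _ a c h0 hcvv, if_pos hv]
        have harith : c + (((rest.takeWhile (fun x => x == v)).length + 1 : Nat) : Int)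
            = c + (1 + ((rest.takeWhile (fun x => x == v)).length : Int)) := by
          push_cast; ring
        rw [harith]
        exact ih _ hlen hptail _ _
          (PySem.Int.mod_nonneg _ (by omega))
          (fun w t' ht => by
            have h1 : PySem.Int.mod (c + (1 + ((rest.takeWhile (fun x => x == v)).length : Int))) v < v :=
              PySem.Int.mod_lt _ (by omega)
            have h2 : v < w := htailinv w t' ht
            have : max w 1 = w := max_eq_left (by omega)
            omega)
      · have hc0 : c = 0 := by
          have : max v 1 = 1 := max_eq_right (by omega)
          omega
        subst hc0
        rw [loopA_run_nonpos v hv _ _ a, if_neg hv]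
        have harith : a + (((rest.takeWhile (fun x => x == v)).length + 1 : Nat) : Int)
            = a + (0 + (1 + ((rest.takeWhile (fun x => x == v)).length : Int))) := by
          push_cast; ring
        rw [harith]
        exact ih _ hlen hptail _ _ le_rfl
          (fun w t' ht => by
            have : (1 : Int) ≤ max w 1 := le_max_right _ _
            omega)

-- ===== VERDICT (by name: the statement is the Claim_ definition above) =====
theorem solution_spec : Claim_equal_solution := by
  intro n group _
  unfold Spec_solution solution solution_alt
  refine loops_agree (PySem.List.sorted group (fun x => x) false).length _ le_rfl ?_ 0 0 le_rfl ?_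
  · simpa using PySem.List.sorted_pairwise group (fun x => x)
  · intro v t' _
    have : (1 : Int) ≤ max v 1 := le_max_right _ _
    omega
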